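-- pv_equiv track=rewrite | github.com/bogdanSudo/Walmart-Sales | data_functions.py | map_store_sales
-- ===== SOURCE A (Python) =====
-- def map_store_sales(sales_list, list_stores):
--     dict_store_sales = {}
--     for i in range(len(list_stores)):
--         store = list_stores[i]
--         sale = sales_list[i]
--         if store not in dict_store_sales:
--             dict_store_sales[store] = [sale]
--         else:
--             dict_store_sales[store].append(sale)
--
--     return dict_store_sales
-- ===== SOURCE B (Python) =====
-- def map_store_sales(sales_list, list_stores):
--     stores = list(dict.fromkeys(list_stores))
--     return {store: [sales_list[i] for i in range(len(list_stores))
--                     if list_stores[i] == store]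
--             for store in stores}
-- ===== Notes on version B (the rewrite author's own statement) =====
-- stated objective: idiomatic
-- what changed: Replaces the single stateful grouping pass over an incrementally-updated dict with a dict comprehension: collect the distinct stores once via dict.fromkeys, then build each store's sales list by a separate positional rescan of the whole list.
import Mathlib
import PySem

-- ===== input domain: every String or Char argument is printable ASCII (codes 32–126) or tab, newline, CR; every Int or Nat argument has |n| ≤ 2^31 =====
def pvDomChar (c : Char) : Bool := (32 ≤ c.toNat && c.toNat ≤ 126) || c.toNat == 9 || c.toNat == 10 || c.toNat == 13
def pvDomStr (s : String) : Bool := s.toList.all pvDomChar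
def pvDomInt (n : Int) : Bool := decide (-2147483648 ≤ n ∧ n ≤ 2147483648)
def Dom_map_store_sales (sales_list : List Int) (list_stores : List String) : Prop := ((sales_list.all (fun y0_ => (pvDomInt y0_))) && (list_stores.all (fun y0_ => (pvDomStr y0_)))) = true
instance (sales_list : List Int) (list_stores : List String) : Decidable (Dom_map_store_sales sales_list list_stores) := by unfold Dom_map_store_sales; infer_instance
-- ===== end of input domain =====

-- B is the idiomatic rewrite: collect distinct stores once, then build the dict by one
-- positional rescan of the full list per store; returns the same dict (value & order) as A.

-- ===== PORT A =====
-- single pass: for i in range(len(list_stores)): insert/append into the dict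
def map_store_sales (sales_list : List Int) (list_stores : List String) : List (String × List Int) :=
  ((PySem.List.pyRange 0 (list_stores.length : Int) 1).foldl (fun d i =>
    let store := PySem.List.pyGetD list_stores i ""
    let sale := PySem.List.pyGetD sales_list i 0
    if d.contains store = false then d.insert store [sale]
    else d.modify store [] (fun v => v ++ [sale])) PySem.Dict.empty).items

-- ===== PORT B =====
-- distinct stores via dict.fromkeys, then one rescan of all positions per store
def map_store_sales_alt (sales_list : List Int) (list_stores : List String) : List (String × List Int) :=
  (PySem.List.dedup list_stores).map (fun store =>
    (store, (PySem.List.pyRange 0 (list_stores.length : Int) 1).filterMap (fun i =>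
      if PySem.List.pyGetD list_stores i "" == store then some (PySem.List.pyGetD sales_list i 0)
      else none)))

-- ===== PRECONDITION & SPEC =====
-- Pre_ excludes exactly the inputs where A raises IndexError: sales_list shorter than list_stores.
def Pre_map_store_sales (sales_list : List Int) (list_stores : List String) : Prop :=
  list_stores.length ≤ sales_list.length
instance (sales_list : List Int) (list_stores : List String) : Decidable (Pre_map_store_sales sales_list list_stores) := by unfold Pre_map_store_sales; infer_instance
def pvWitness_map_store_sales : List Int × List String := ([1, 2, 3, 4], ["x", "y", "x", "z"])

def Spec_map_store_sales (sales_list : List Int) (list_stores : List String) (out : List (String × List Int)) : Prop := out = map_store_sales_alt sales_list list_stores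
instance (sales_list : List Int) (list_stores : List String) (out : List (String × List Int)) : Decidable (Spec_map_store_sales sales_list list_stores out) := by unfold Spec_map_store_sales; infer_instance

-- ===== CLAIM (what is proved, stated in full; the proofs are below) =====
def Claim_equal_map_store_sales : Prop := ∀ (sales_list : List Int) (list_stores : List String), Dom_map_store_sales sales_list list_stores → Pre_map_store_sales sales_list list_stores → Spec_map_store_sales sales_list list_stores (map_store_sales sales_list list_stores)

-- ===== LEMMAS AND PROOFS =====


-- step of A's loop is unconditionally a modify-append
theorem pvStepEq (d : PySem.Dict String (List Int)) (s : String) (x : Int) :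
    (if d.contains s = false then d.insert s [x] else d.modify s [] (fun v => v ++ [x]))
    = d.modify s [] (fun v => v ++ [x]) := by
  by_cases h : d.contains s = false
  · simp [PySem.Dict.modify, PySem.Dict.getD_of_not_contains, h]
  · simp [h]

-- A's index loop over range = fold of modify-append over the zipped pairs
theorem pvFoldA (stores : List String) : ∀ (sales : List Int) (d : PySem.Dict String (List Int)),
    stores.length ≤ sales.length →
    (List.range stores.length).foldl
      (fun d i => d.modify (stores.getD i "") [] (fun v => v ++ [sales.getD i 0])) d
    = (stores.zip sales).foldl (fun d p => d.modify p.1 [] (fun v => v ++ [p.2])) d := by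
  induction stores with
  | nil => intro sales d _; rfl
  | cons s st ih =>
    intro sales d hlen
    cases sales with
    | nil => simp at hlen
    | cons x sl =>
      simp only [List.length_cons, List.range_succ_eq_map, List.foldl_cons, List.foldl_map,
        List.getD_cons_zero, List.getD_cons_succ, List.zip_cons_cons]
      exact ih sl _ (by simpa using hlen)

-- B's per-store index rescan = the zipped pairs filtered to that store
theorem pvFiltB (stores : List String) : ∀ (sales : List Int) (k : String),
    stores.length ≤ sales.length →
    (List.range stores.length).filterMap
      (fun i => if (stores.getD i "" == k) = true then some (sales.getD i 0) else none)
    = ((stores.zip sales).filter (fun p => p.1 == k)).map (·.2) := by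
  induction stores with
  | nil => intro sales k _; rfl
  | cons s st ih =>
    intro sales k hlen
    cases sales with
    | nil => simp at hlen
    | cons x sl =>
      have ih' := ih sl k (by simpa using hlen)
      by_cases h : s = k
      · simp [List.range_succ_eq_map, List.filterMap_map, Function.comp, h] at ih' ⊢
        exact ih'
      · simp [List.range_succ_eq_map, List.filterMap_map, Function.comp, h] at ih' ⊢
        exact ih'

-- ===== VERDICT (by name: the statement is the Claim_ definition above) =====
theorem map_store_sales_spec : Claim_equal_map_store_sales := by
  intro sales_list list_stores _ hpre
  unfold Spec_map_store_sales map_store_sales map_store_sales_alt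
  have hpre' : list_stores.length <= sales_list.length := hpre
  rw [PySem.List.pyRange_zero_natCast, List.foldl_map]
  simp only [List.filterMap_map, Function.comp, PySem.List.pyGetD_natCast, pvStepEq]
  rw [pvFoldA list_stores sales_list PySem.Dict.empty hpre']
  have hnd : ((list_stores.zip sales_list).foldl
      (fun d p => d.modify p.1 [] (fun v => v ++ [p.2])) PySem.Dict.empty).keys.Nodup :=
    PySem.Dict.nodup_keys_foldl_modify_key _ Prod.fst [] _ PySem.Dict.empty (by simp)
  rw [PySem.Dict.items_eq_map_keys _ hnd []]
  have hkeys : ((list_stores.zip sales_list).foldl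
      (fun d p => d.modify p.1 [] (fun v => v ++ [p.2])) PySem.Dict.empty).keys
      = PySem.Set.ofList list_stores := by
    rw [PySem.Dict.keys_foldl_modify_key _ Prod.fst [] _ PySem.Dict.empty,
      PySem.Dict.keys_empty, List.map_fst_zip hpre']
    rfl
  rw [hkeys, PySem.List.dedup_eq_ofList]
  refine List.map_congr_left (fun k _ => ?_)
  rw [PySem.Dict.getD_foldl_modify_append, PySem.Dict.getD_empty, List.nil_append,
    pvFiltB list_stores sales_list k hpre']
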